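-- pv_equiv track=rewrite | github.com/pparkddo/ps | leetcode/weekly-contest/473/2.py | maxAlternatingSum
-- ===== SOURCE A (Python) =====
-- from typing import List
--
-- def maxAlternatingSum(nums: List[int]) -> int:
--     doubled = sorted([n ** 2 for n in nums])
--     answer = 0
--
--     half = len(doubled) // 2
--     for i, d in enumerate(doubled):
--         if i < half:
--             answer -= d
--         else:
--             answer += d
--
--     return answer
-- ===== SOURCE B (Python) =====
-- def maxAlternatingSum(nums):
--     sq = [n * n for n in nums]
--     k = len(sq) // 2
--     total = sum(sq)
--     if k == 0:
--         return total
--     # binary search on the VALUE: t = smallest v with count(sq <= v) >= k,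
--     # i.e. the k-th smallest square; no sorting, O(n log maxValue)
--     lo, hi = 0, max(sq)
--     while lo < hi:
--         mid = (lo + hi) // 2
--         cnt = 0
--         for x in sq:
--             if x <= mid:
--                 cnt += 1
--         if cnt >= k:
--             hi = mid
--         else:
--             lo = mid + 1
--     t = lo
--     cnt_lt = 0
--     low_sum = 0
--     for x in sq:
--         if x < t:
--             cnt_lt += 1
--             low_sum += x
--     low_sum += (k - cnt_lt) * t
--     return total - 2 * low_sum
-- ===== Notes on version B (the rewrite author's own statement) =====
-- stated objective: alternative
-- what changed: B never sorts: it finds the k-th smallest square by binary searching on the value (counting squares <= mid each step), then computes the answer in one counting pass as total - 2*(sum of the k smallest squares).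
import Mathlib
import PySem

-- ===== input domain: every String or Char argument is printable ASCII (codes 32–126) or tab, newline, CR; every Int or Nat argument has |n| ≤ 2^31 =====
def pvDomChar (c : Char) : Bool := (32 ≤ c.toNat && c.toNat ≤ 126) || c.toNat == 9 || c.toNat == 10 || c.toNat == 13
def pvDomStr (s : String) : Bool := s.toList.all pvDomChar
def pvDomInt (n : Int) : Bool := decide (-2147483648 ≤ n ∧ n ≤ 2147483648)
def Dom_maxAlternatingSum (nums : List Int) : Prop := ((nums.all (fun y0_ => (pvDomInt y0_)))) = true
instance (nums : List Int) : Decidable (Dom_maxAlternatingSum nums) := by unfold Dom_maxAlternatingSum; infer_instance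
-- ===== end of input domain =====

-- B avoids sorting: a binary search on the value (counting squares ≤ mid) finds the
-- k-th smallest square, then one counting pass yields total - 2*(sum of the lower half).

-- ===== PORT A =====
def maxAlternatingSum (nums : List Int) : Int :=
  let doubled := PySem.List.sorted (nums.map (fun n => n ^ 2)) (fun x => x) false
  let half := PySem.Int.floordiv (doubled.length : Int) 2
  (PySem.List.enumerate doubled 0).foldl
    (fun answer p => if p.1 < half then answer - p.2 else answer + p.2) 0

-- ===== PORT B =====
-- midpoint bounds, cited by pvBsearch's decreasing_by
theorem pvMid_bounds {lo hi : Int} (h : lo < hi) :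
    lo ≤ PySem.Int.floordiv (lo + hi) 2 ∧ PySem.Int.floordiv (lo + hi) 2 < hi := by
  rw [PySem.Int.floordiv_eq_ediv_of_pos (by omega : (0:Int) < 2)]
  omega

-- the while lo < hi loop of Source B: binary search on the value for the k-th smallest
def pvBsearch (sq : List Int) (k : Nat) (lo hi : Int) : Int :=
  if h : lo < hi then
    if k ≤ sq.countP (fun x => decide (x ≤ PySem.Int.floordiv (lo + hi) 2)) then
      pvBsearch sq k lo (PySem.Int.floordiv (lo + hi) 2)
    else
      pvBsearch sq k (PySem.Int.floordiv (lo + hi) 2 + 1) hi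
  else lo
termination_by (hi - lo).toNat
decreasing_by
  · have := pvMid_bounds h; omega
  · have := pvMid_bounds h; omega

def maxAlternatingSum_alt (nums : List Int) : Int :=
  let sq := nums.map (fun n => n * n)
  let k := sq.length / 2
  let total := sq.sum
  if k = 0 then total
  else
    let t := pvBsearch sq k 0 ((PySem.List.max? sq (fun x => x)).getD 0)
    let cntLt := sq.countP (fun x => decide (x < t))
    let lowSum := (sq.filter (fun x => decide (x < t))).sum + ((k : Int) - (cntLt : Int)) * t
    total - 2 * lowSum

-- ===== PRECONDITION & SPEC =====
def Spec_maxAlternatingSum (nums : List Int) (out : Int) : Prop := out = maxAlternatingSum_alt nums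
instance (nums : List Int) (out : Int) : Decidable (Spec_maxAlternatingSum nums out) := by unfold Spec_maxAlternatingSum; infer_instance

-- ===== CLAIM (what is proved, stated in full; the proofs are below) =====
def Claim_equal_maxAlternatingSum : Prop := ∀ (nums : List Int), Dom_maxAlternatingSum nums → Spec_maxAlternatingSum nums (maxAlternatingSum nums)

-- ===== LEMMAS AND PROOFS =====

-- A's signed enumerate fold, in closed form
theorem foldA (l : List Int) : ∀ (s half a : Int),
    (PySem.List.enumerate l s).foldl
        (fun answer p => if p.1 < half then answer - p.2 else answer + p.2) a
      = a - (l.take (half - s).toNat).sum + (l.drop (half - s).toNat).sum := by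
  induction l with
  | nil => intro s half a; simp [PySem.List.enumerate_nil]
  | cons x xs ih =>
    intro s half a
    rw [PySem.List.enumerate_cons, List.foldl_cons]
    by_cases h : s < half
    · have ht : (half - s).toNat = (half - (s + 1)).toNat + 1 := by omega
      simp only [h, if_pos, ih (s+1), ht, List.take_succ_cons, List.drop_succ_cons,
        List.sum_cons]
      ring
    · have h0 : (half - s).toNat = 0 := by omega
      have h1 : (half - (s + 1)).toNat = 0 := by omega
      simp only [h, if_neg, not_false_iff, ih (s+1), h0, h1, List.take_zero,
        List.drop_zero, List.sum_nil, List.sum_cons]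
      ring

-- binary-search invariant: the result t is the least value with count(≤ t) ≥ k
theorem bsearch_spec : ∀ n (sq : List Int) (k : Nat) (lo hi : Int), (hi - lo).toNat ≤ n →
    lo ≤ hi →
    sq.countP (fun x => decide (x ≤ lo - 1)) < k →
    k ≤ sq.countP (fun x => decide (x ≤ hi)) →
    sq.countP (fun x => decide (x ≤ pvBsearch sq k lo hi - 1)) < k
    ∧ k ≤ sq.countP (fun x => decide (x ≤ pvBsearch sq k lo hi)) := by
  intro n
  induction n with
  | zero =>
    intro sq k lo hi hn hle h1 h2
    have heq : lo = hi := by omega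
    rw [pvBsearch, dif_neg (by omega : ¬ lo < hi)]
    subst heq
    exact ⟨h1, h2⟩
  | succ n ih =>
    intro sq k lo hi hn hle h1 h2
    rw [pvBsearch]
    by_cases h : lo < hi
    · rw [dif_pos h]
      have hm := pvMid_bounds h
      by_cases hc : k ≤ sq.countP (fun x => decide (x ≤ PySem.Int.floordiv (lo + hi) 2))
      · rw [if_pos hc]
        exact ih sq k lo _ (by omega) (by omega) h1 hc
      · rw [if_neg hc]
        refine ih sq k _ hi (by omega) (by omega) ?_ h2
        have : PySem.Int.floordiv (lo + hi) 2 + 1 - 1 = PySem.Int.floordiv (lo + hi) 2 := by omega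
        rw [this]
        omega
    · rw [dif_neg h]
      have heq : lo = hi := by omega
      subst heq
      exact ⟨h1, h2⟩

-- in a sorted list, membership of an index in the countP-prefix decides the predicate
theorem sorted_countP_iff (q : Int → Bool) (hq : ∀ a b : Int, a ≤ b → q b = true → q a = true)
    (s : List Int) (hs : s.Pairwise (fun a b => a ≤ b)) :
    ∀ i (hi : i < s.length), (q s[i] = true ↔ i < s.countP q) := by
  induction s with
  | nil => intro i hi; simp at hi
  | cons x xs ih =>
    rw [List.pairwise_cons] at hs
    intro i hi
    by_cases hx : q x = true
    · cases i with
      | zero =>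
        simp only [List.getElem_cons_zero, List.countP_cons, hx, if_pos]
        exact ⟨fun _ => by omega, fun _ => trivial⟩
      | succ i =>
        simp only [List.getElem_cons_succ, List.countP_cons, hx, if_pos]
        rw [ih hs.2 i (by simpa using hi)]
        omega
    · have hzero : xs.countP q = 0 := by
        rw [List.countP_eq_zero]
        intro y hy hqy
        exact absurd (hq x y (hs.1 y hy) hqy) hx
      cases i with
      | zero => simp [hx, hzero]
      | succ i =>
        have hi' : i < xs.length := by simpa using hi
        have hmem : xs[i]'hi' ∈ xs := List.getElem_mem hi'
        have hni : ¬ q (xs[i]'hi') = true := fun h => absurd (hq x _ (hs.1 _ hmem) h) hx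
        simp [hx, hzero, hni]

-- pin the sorted element at index j from the two count bounds
theorem sorted_get_eq (s : List Int) (hs : s.Pairwise (fun a b => a ≤ b))
    (j : Nat) (hj : j < s.length) (t : Int)
    (h1 : s.countP (fun x => decide (x < t)) ≤ j)
    (h2 : j < s.countP (fun x => decide (x ≤ t))) : s[j] = t := by
  have hlt := sorted_countP_iff (fun x => decide (x < t))
    (fun a b hab hb => by simp at hb ⊢; omega) s hs j hj
  have hle := sorted_countP_iff (fun x => decide (x ≤ t))
    (fun a b hab hb => by simp at hb ⊢; omega) s hs j hj
  have hnlt : ¬ (s[j] < t) := by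
    intro h; have := hlt.mp (by simpa using h); omega
  have hsle : s[j] ≤ t := by
    have := hle.mpr h2; simpa using this
  omega

-- sum of the k smallest of a sorted list, via the boundary value t = s[h-1]
theorem sum_take_eq (s : List Int) (hs : s.Pairwise (fun a b => a ≤ b))
    (h : Nat) (hh : 1 ≤ h) (hle : h ≤ s.length) (t : Int)
    (ht : s[h-1]'(by omega) = t) :
    ((s.take h).sum : Int)
      = (s.filter (fun x => decide (x < t))).sum
        + ((h : Int) - (s.countP (fun x => decide (x < t)) : Int)) * t := by
  have hG := sorted_countP_iff (fun x => decide (x < t))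
    (fun a b hab hb => by simp at hb ⊢; omega) s hs
  set c := s.countP (fun x => decide (x < t)) with hc
  have hcl : c ≤ s.length := List.countP_le_length
  have hch : c ≤ h - 1 := by
    by_contra hlt
    have := (hG (h-1) (by omega)).mpr (by omega)
    rw [ht] at this
    simp at this
  have htake_all : ∀ x ∈ s.take c, decide (x < t) = true := by
    intro x hx
    obtain ⟨i, hi, hix⟩ := List.mem_iff_getElem.mp hx
    have hic : i < c := by rw [List.length_take] at hi; omega
    have hil : i < s.length := by omega
    have hx1 : (s.take c)[i]'hi = s[i]'hil := List.getElem_take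
    rw [← hix, hx1]
    exact (hG i hil).mpr hic
  have hdrop_none : ∀ x ∈ s.drop c, ¬ decide (x < t) = true := by
    intro x hx hq
    obtain ⟨i, hi, hix⟩ := List.mem_iff_getElem.mp hx
    have hil : c + i < s.length := by rw [List.length_drop] at hi; omega
    have hx1 : (s.drop c)[i]'hi = s[c+i]'hil := List.getElem_drop ..
    rw [← hix, hx1] at hq
    have := (hG (c+i) hil).mp hq
    omega
  have hfil : s.filter (fun x => decide (x < t)) = s.take c := by
    conv_lhs => rw [← List.take_append_drop c s]
    rw [List.filter_append, List.filter_eq_self.mpr htake_all,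
      List.filter_eq_nil_iff.mpr hdrop_none, List.append_nil]
  have hsplit : s.take h = s.take c ++ (s.drop c).take (h - c) := by
    conv_lhs => rw [show h = c + (h - c) by omega]
    exact List.take_add ..
  have hseg : (s.drop c).take (h - c) = List.replicate (h - c) t := by
    rw [List.eq_replicate_iff]
    refine ⟨by rw [List.length_take, List.length_drop]; omega, ?_⟩
    intro x hx
    obtain ⟨i, hi, hix⟩ := List.mem_iff_getElem.mp hx
    have hilt : i < h - c := by
      rw [List.length_take, List.length_drop] at hi; omega
    have hidx : c + i < s.length := by omega
    have hx1 : ((s.drop c).take (h-c))[i]'hi = s[c+i]'hidx := by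
      rw [List.getElem_take, List.getElem_drop]
    have hnlt : ¬ (s[c+i]'hidx < t) := by
      intro hq
      have := (hG (c+i) hidx).mp (by simpa using hq)
      omega
    have hle2 : s[c+i]'hidx ≤ t := by
      rcases eq_or_lt_of_le (show c + i ≤ h - 1 by omega) with he | hlt2
      · rw [← ht]; exact le_of_eq (by congr 1 <;> omega)
      · rw [← ht]
        exact List.pairwise_iff_getElem.mp hs (c+i) (h-1) hidx (by omega) hlt2
    rw [← hix, hx1]
    omega
  rw [hsplit, List.sum_append, hseg, List.sum_replicate, hfil]
  have hcast : ((h - c : Nat) : Int) = (h : Int) - (c : Int) := by omega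
  simp only [nsmul_eq_mul, hcast]
-- ===== VERDICT (by name: the statement is the Claim_ definition above) =====
theorem maxAlternatingSum_spec : Claim_equal_maxAlternatingSum := by
  intro nums _
  unfold Spec_maxAlternatingSum maxAlternatingSum maxAlternatingSum_alt
  simp only []
  have hmap : nums.map (fun n : Int => n ^ 2) = nums.map (fun n => n * n) := by
    simp [pow_two]
  rw [hmap]
  set sq := nums.map (fun n => n * n) with hsq
  set s := PySem.List.sorted sq (fun x => x) false with hsrt
  have hperm : s.Perm sq := PySem.List.sorted_perm sq (fun x => x) false
  have hlen : s.length = sq.length := hperm.length_eq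
  have hpair : s.Pairwise (fun a b : Int => a ≤ b) := by
    simpa using PySem.List.sorted_pairwise sq (fun x => x)
  set k := sq.length / 2 with hk
  have hhalf : PySem.Int.floordiv (s.length : Int) 2 = (k : Int) := by
    rw [hlen]; exact_mod_cast PySem.Int.floordiv_natCast sq.length 2
  rw [hhalf, foldA]
  have htn : ((k : Int) - 0).toNat = k := by omega
  rw [htn]
  have hsum : s.sum = sq.sum := hperm.sum_eq
  have hsplitsum : (s.take k).sum + (s.drop k).sum = s.sum := by
    conv_rhs => rw [← List.take_append_drop k s]
    rw [List.sum_append]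
  by_cases hk0 : k = 0
  · rw [if_pos hk0]
    rw [hk0]
    simp only [List.take_zero, List.drop_zero, List.sum_nil]
    omega
  · rw [if_neg hk0]
    have hk1 : 1 ≤ k := by omega
    have hkle : k ≤ sq.length := by omega
    have hjlt : k - 1 < sq.length := by omega
    have hnn : ∀ x ∈ sq, 0 ≤ x := by
      intro x hx
      obtain ⟨m, _, hm⟩ := List.mem_map.mp (hsq ▸ hx)
      rw [← hm]; exact mul_self_nonneg m
    have hne : sq ≠ [] := by
      intro hnil; rw [hnil] at hkle; simp at hkle; omega
    obtain ⟨M, hM⟩ : ∃ M, PySem.List.max? sq (fun x => x) = some M := by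
      rcases hmx : PySem.List.max? sq (fun x => x) with _ | M
      · exact absurd ((PySem.List.max?_eq_none_iff (xs := sq) (key := fun x => x)).mp hmx) hne
      · exact ⟨M, rfl⟩
    have hMd : (PySem.List.max? sq (fun x => x)).getD 0 = M := by rw [hM]; rfl
    have hM0 : 0 ≤ M := hnn M (PySem.List.max?_mem hM)
    have h1 : sq.countP (fun x => decide (x ≤ (0:Int) - 1)) < k := by
      have : sq.countP (fun x => decide (x ≤ (0:Int) - 1)) = 0 := by
        rw [List.countP_eq_zero]
        intro x hx
        have := hnn x hx
        simp; omega
      omega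
    have h2 : k ≤ sq.countP (fun x => decide (x ≤ M)) := by
      have : sq.countP (fun x => decide (x ≤ M)) = sq.length := by
        rw [List.countP_eq_length]
        intro x hx
        have := PySem.List.max?_isMax hM x hx
        simp at this ⊢; omega
      omega
    obtain ⟨hb1, hb2⟩ := bsearch_spec (M - 0).toNat sq k 0 M le_rfl hM0 h1 h2
    rw [hMd]
    set t := pvBsearch sq k 0 M with htdef
    have hltle : sq.countP (fun x => decide (x < t)) = sq.countP (fun x => decide (x ≤ t - 1)) := by
      apply List.countP_congr
      intro x _
      simp only [decide_eq_true_eq]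
      constructor <;> intro h <;> omega
    have hcs1 : s.countP (fun x => decide (x < t)) ≤ k - 1 := by
      rw [hperm.countP_eq, hltle]; omega
    have hcs2 : k - 1 < s.countP (fun x => decide (x ≤ t)) := by
      rw [hperm.countP_eq]; omega
    have hst : s[k-1]'(by omega) = t :=
      sorted_get_eq s hpair (k-1) (by omega) t hcs1 hcs2
    have htake := sum_take_eq s hpair k hk1 (by omega) t hst
    have hfil : (s.filter (fun x => decide (x < t))).sum
        = (sq.filter (fun x => decide (x < t))).sum :=
      (hperm.filter _).sum_eq
    have hcnt : s.countP (fun x => decide (x < t)) = sq.countP (fun x => decide (x < t)) :=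
      hperm.countP_eq _
    rw [hfil, hcnt] at htake
    rw [htake] at hsplitsum
    rw [hsum] at hsplitsum
    linarith [hsplitsum]
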